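-- pv_equiv track=rewrite | github.com/plnh/Hangman | Self_Practice_Mon_w15.py | sort_by_ext
-- ===== SOURCE A (Python) =====
-- from typing import List
--
-- def sort_by_ext(files: List[str]) -> List[str]:
--
--     noext =[]
--     noname = []
--     remain = []
--     for file in sorted(files):
--         if file.rfind('.') == -1 or file.rfind('.') == len(file) -1:
--             noext.append(file)
--         elif file.rfind('.') == 0:
--             noname.append(file)
--         else:
--             remain.append(file)
--
--
--     return sorted(noname, key=lambda x:x[1::]) + noext + sorted(remain, key= lambda x:x[x.rfind('.')+1::])
-- ===== SOURCE B (Python) =====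
-- from typing import List
--
-- def sort_by_ext(files: List[str]) -> List[str]:
--     def key(f):
--         if f.rfind('.') == -1 or f.rfind('.') == len(f) - 1:
--             return (1, f)
--         if f.rfind('.') == 0:
--             return (0, f[1:])
--         return (2, f[f.rfind('.') + 1:])
--     return sorted(sorted(files), key=key)
-- ===== Notes on version B (the rewrite author's own statement) =====
-- stated objective: simpler
-- what changed: Replaces the three-bucket partition loop plus three separate sorts and concatenation with a single stable sort of sorted(files) by a composite (category, sub-key) key.
import Mathlib
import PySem

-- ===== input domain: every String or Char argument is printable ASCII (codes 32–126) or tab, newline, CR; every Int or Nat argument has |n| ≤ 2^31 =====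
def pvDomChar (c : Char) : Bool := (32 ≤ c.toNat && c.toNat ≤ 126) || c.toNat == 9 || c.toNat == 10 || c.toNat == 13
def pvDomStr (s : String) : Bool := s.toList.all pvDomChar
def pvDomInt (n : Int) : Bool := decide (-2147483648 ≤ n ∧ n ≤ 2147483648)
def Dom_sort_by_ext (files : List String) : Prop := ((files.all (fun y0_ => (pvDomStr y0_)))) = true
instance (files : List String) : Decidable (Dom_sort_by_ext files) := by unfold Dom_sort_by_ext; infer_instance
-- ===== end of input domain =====

-- B replaces A's three-bucket partition with three separate sorts by a single stable
-- composite-key sort over sorted(files) (objective: simpler decomposition, same cost).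

-- ===== PORT A =====
def sort_by_ext (files : List String) : List String :=
  let acc := (PySem.List.sorted files (fun x => x) false).foldl
    (fun (st : List String × List String × List String) file =>
      if PySem.Str.rfind file "." = -1 ∨ PySem.Str.rfind file "." = PySem.Str.len file - 1 then
        (st.1 ++ [file], st.2.1, st.2.2)
      else if PySem.Str.rfind file "." = 0 then
        (st.1, st.2.1 ++ [file], st.2.2)
      else
        (st.1, st.2.1, st.2.2 ++ [file]))
    ([], [], [])
  PySem.List.sorted acc.2.1 (fun x => PySem.Str.slice x (some 1) none) false
    ++ acc.1
    ++ PySem.List.sorted acc.2.2 (fun x => PySem.Str.slice x (some (PySem.Str.rfind x "." + 1)) none) false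

-- ===== PORT B =====
-- key(f) of Source B: category and sub-key
def pvBKey (f : String) : Int × String :=
  if PySem.Str.rfind f "." = -1 ∨ PySem.Str.rfind f "." = PySem.Str.len f - 1 then (1, f)
  else if PySem.Str.rfind f "." = 0 then (0, PySem.Str.slice f (some 1) none)
  else (2, PySem.Str.slice f (some (PySem.Str.rfind f "." + 1)) none)

def sort_by_ext_alt (files : List String) : List String :=
  PySem.List.sorted2 (PySem.List.sorted files (fun x => x) false)
    (fun f => (pvBKey f).1) (fun f => (pvBKey f).2) false

-- ===== PRECONDITION & SPEC =====
def Spec_sort_by_ext (files : List String) (out : List String) : Prop := out = sort_by_ext_alt files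
instance (files : List String) (out : List String) : Decidable (Spec_sort_by_ext files out) := by unfold Spec_sort_by_ext; infer_instance

-- ===== CLAIM (what is proved, stated in full; the proofs are below) =====
def Claim_equal_sort_by_ext : Prop := ∀ (files : List String), Dom_sort_by_ext files → Spec_sort_by_ext files (sort_by_ext files)

-- ===== LEMMAS AND PROOFS =====

-- proof-only shorthands for the two components of B's key
def pvCat (f : String) : Int := (pvBKey f).1
def pvSub (f : String) : String := (pvBKey f).2

theorem pvCat_cases (f : String) : pvCat f = 0 ∨ pvCat f = 1 ∨ pvCat f = 2 := by
  unfold pvCat pvBKey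
  split_ifs <;> simp

-- insertBy passes over a prefix it is not before
theorem pv_insertBy_append_right {α : Type} (before : α → α → Bool) (x : α) (p q : List α)
    (h : ∀ y ∈ p, before x y = false) :
    PySem.List.insertBy before x (p ++ q) = p ++ PySem.List.insertBy before x q := by
  induction p with
  | nil => rfl
  | cons a t ih =>
    have ha : before x a = false := h a (by simp)
    simp [PySem.List.insertBy, ha, ih (fun y hy => h y (by simp [hy]))]

-- insertBy lands inside the prefix when it is before everything in the suffix
theorem pv_insertBy_append_left {α : Type} (before : α → α → Bool) (x : α) (p q : List α)
    (h : ∀ y ∈ q, before x y = true) :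
    PySem.List.insertBy before x (p ++ q) = PySem.List.insertBy before x p ++ q := by
  induction p with
  | nil =>
    cases q with
    | nil => rfl
    | cons b t => simp [PySem.List.insertBy, h b (by simp)]
  | cons a t ih =>
    by_cases ha : before x a = true
    · simp [PySem.List.insertBy, ha]
    · simp only [List.cons_append, PySem.List.insertBy, eq_false_of_ne_true ha]
      simp [ih]

-- insertBy only looks at 'before x ·' on members of the list
theorem pv_insertBy_congr {α : Type} (b1 b2 : α → α → Bool) (x : α) (ys : List α)
    (h : ∀ y ∈ ys, b1 x y = b2 x y) :
    PySem.List.insertBy b1 x ys = PySem.List.insertBy b2 x ys := by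
  induction ys with
  | nil => rfl
  | cons a t ih =>
    have ha : b1 x a = b2 x a := h a (by simp)
    by_cases hb : b2 x a = true
    · simp [PySem.List.insertBy, ha, hb]
    · simp only [PySem.List.insertBy, ha, eq_false_of_ne_true hb]
      simp [ih (fun y hy => h y (by simp [hy]))]

-- a stable sort only looks at the key on members
theorem pv_sorted_congr (xs : List String) (k1 k2 : String → String)
    (h : ∀ y ∈ xs, k1 y = k2 y) :
    PySem.List.sorted xs k1 false = PySem.List.sorted xs k2 false := by
  induction xs using List.reverseRecOn with
  | nil => rfl
  | append_singleton t x ih =>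
    rw [PySem.List.sorted_eq_foldl_insertBy, PySem.List.sorted_eq_foldl_insertBy,
        List.foldl_append, List.foldl_append]
    simp only [List.foldl_cons, List.foldl_nil]
    rw [← PySem.List.sorted_eq_foldl_insertBy, ← PySem.List.sorted_eq_foldl_insertBy,
        ih (fun y hy => h y (by simp [hy]))]
    exact pv_insertBy_congr _ _ x _ (fun y hy => by
      have hyx : y ∈ t := by
        have := (PySem.List.mem_sorted (xs := t) (key := k2) (rev := false) (x := y)).1 hy
        exact this
      rw [h y (by simp [hyx]), h x (by simp)])

-- A's partition loop, characterised by B's category key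
theorem pv_fold_buckets (l : List String) (a b c : List String) :
    l.foldl
      (fun (st : List String × List String × List String) file =>
        if PySem.Str.rfind file "." = -1 ∨ PySem.Str.rfind file "." = PySem.Str.len file - 1 then
          (st.1 ++ [file], st.2.1, st.2.2)
        else if PySem.Str.rfind file "." = 0 then
          (st.1, st.2.1 ++ [file], st.2.2)
        else
          (st.1, st.2.1, st.2.2 ++ [file]))
      (a, b, c)
    = (a ++ l.filter (fun f => pvCat f == 1),
       b ++ l.filter (fun f => pvCat f == 0),
       c ++ l.filter (fun f => pvCat f == 2)) := by
  induction l generalizing a b c with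
  | nil => simp
  | cons x t ih =>
    simp only [List.foldl_cons, List.filter_cons]
    by_cases h1 : PySem.Str.rfind x "." = -1 ∨ PySem.Str.rfind x "." = PySem.Str.len x - 1
    · have hc : pvCat x = 1 := by unfold pvCat pvBKey; rw [if_pos h1]
      rw [if_pos h1, ih]
      simp [hc]
    · by_cases h0 : PySem.Str.rfind x "." = 0
      · have hc : pvCat x = 0 := by unfold pvCat pvBKey; rw [if_neg h1, if_pos h0]
        rw [if_neg h1, if_pos h0, ih]
        simp [hc]
      · have hc : pvCat x = 2 := by unfold pvCat pvBKey; rw [if_neg h1, if_neg h0]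
        rw [if_neg h1, if_neg h0, ih]
        simp [hc]

-- the lexicographic 'before' of sorted2 for B's key
def pvLex (a b : String) : Bool :=
  decide (pvCat a < pvCat b) || (!decide (pvCat b < pvCat a) && decide (pvSub a < pvSub b))

theorem pv_sorted2_snoc (t : List String) (x : String) :
    PySem.List.sorted2 (t ++ [x]) (fun f => (pvBKey f).1) (fun f => (pvBKey f).2) false
      = PySem.List.insertBy pvLex x
          (PySem.List.sorted2 t (fun f => (pvBKey f).1) (fun f => (pvBKey f).2) false) := by
  unfold pvLex pvCat pvSub
  simp only [PySem.List.sorted2, List.foldl_append, List.foldl_cons, List.foldl_nil,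
    Bool.false_eq_true, if_false]

theorem pv_sorted_snoc (xs : List String) (x : String) (key : String → String) :
    PySem.List.sorted (xs ++ [x]) key false
      = PySem.List.insertBy (fun a b => decide (key a < key b)) x (PySem.List.sorted xs key false) := by
  rw [PySem.List.sorted_eq_foldl_insertBy, PySem.List.sorted_eq_foldl_insertBy, List.foldl_append]
  simp only [List.foldl_cons, List.foldl_nil]

theorem pv_cat_of_mem_bucket {c : Int} {y : String} {l : List String}
    (hy : y ∈ PySem.List.sorted (l.filter (fun f => pvCat f == c)) pvSub false) : pvCat y = c := by
  have h := (PySem.List.mem_sorted _ _ _ _).1 hy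
  rw [List.mem_filter] at h
  exact eq_of_beq h.2

theorem pv_sub_of_cat1 (f : String) (h : pvCat f = 1) : pvSub f = f := by
  by_cases h1 : PySem.Str.rfind f "." = -1 ∨ PySem.Str.rfind f "." = PySem.Str.len f - 1
  · unfold pvSub pvBKey; rw [if_pos h1]
  · exfalso
    unfold pvCat pvBKey at h
    rw [if_neg h1] at h
    by_cases h0 : PySem.Str.rfind f "." = 0
    · rw [if_pos h0] at h; simp at h
    · rw [if_neg h0] at h; simp at h

theorem pv_sub_of_cat0 (f : String) (h : pvCat f = 0) :
    pvSub f = PySem.Str.slice f (some 1) none := by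
  by_cases h1 : PySem.Str.rfind f "." = -1 ∨ PySem.Str.rfind f "." = PySem.Str.len f - 1
  · exfalso; unfold pvCat pvBKey at h; rw [if_pos h1] at h; simp at h
  · by_cases h0 : PySem.Str.rfind f "." = 0
    · unfold pvSub pvBKey; rw [if_neg h1, if_pos h0]
    · exfalso; unfold pvCat pvBKey at h; rw [if_neg h1, if_neg h0] at h; simp at h

theorem pv_sub_of_cat2 (f : String) (h : pvCat f = 2) :
    pvSub f = PySem.Str.slice f (some (PySem.Str.rfind f "." + 1)) none := by
  by_cases h1 : PySem.Str.rfind f "." = -1 ∨ PySem.Str.rfind f "." = PySem.Str.len f - 1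
  · exfalso; unfold pvCat pvBKey at h; rw [if_pos h1] at h; simp at h
  · by_cases h0 : PySem.Str.rfind f "." = 0
    · exfalso; unfold pvCat pvBKey at h; rw [if_neg h1, if_pos h0] at h; simp at h
    · unfold pvSub pvBKey; rw [if_neg h1, if_neg h0]

-- the already-id-sorted bucket 1 is fixed by sorting with pvSub (= identity there)
theorem pv_noext_sorted (l : List String) :
    PySem.List.sorted
        (List.filter (fun f => pvCat f == 1) (PySem.List.sorted l (fun x => x) false)) pvSub false
      = List.filter (fun f => pvCat f == 1) (PySem.List.sorted l (fun x => x) false) := by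
  apply PySem.List.sorted_eq_self_of_pairwise
  have hp := PySem.List.sorted_pairwise l (fun x => x)
  refine (List.Pairwise.sublist List.filter_sublist hp).imp_of_mem ?_
  intro a b ha hb hab
  rw [pv_sub_of_cat1 a (eq_of_beq (List.mem_filter.1 ha).2),
      pv_sub_of_cat1 b (eq_of_beq (List.mem_filter.1 hb).2)]
  exact hab

theorem pv_sorted2_split (l : List String) :
    PySem.List.sorted2 l (fun f => (pvBKey f).1) (fun f => (pvBKey f).2) false =
      PySem.List.sorted (l.filter (fun f => pvCat f == 0)) pvSub false
      ++ PySem.List.sorted (l.filter (fun f => pvCat f == 1)) pvSub false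
      ++ PySem.List.sorted (l.filter (fun f => pvCat f == 2)) pvSub false := by
  induction l using List.reverseRecOn with
  | nil => rfl
  | append_singleton t x ih =>
    rw [pv_sorted2_snoc, ih, List.filter_append, List.filter_append, List.filter_append]
    rcases pvCat_cases x with h | h | h
    · rw [show List.filter (fun f => pvCat f == 0) [x] = [x] by simp [h],
          show List.filter (fun f => pvCat f == 1) [x] = [] by simp [h],
          show List.filter (fun f => pvCat f == 2) [x] = [] by simp [h],
          List.append_nil, List.append_nil, pv_sorted_snoc, List.append_assoc,
          pv_insertBy_append_left pvLex x _ _ (fun y hy => by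
            rcases List.mem_append.1 hy with hy1 | hy2
            · have hc := pv_cat_of_mem_bucket hy1; simp [pvLex, h, hc]
            · have hc := pv_cat_of_mem_bucket hy2; simp [pvLex, h, hc]),
          pv_insertBy_congr pvLex (fun a b => decide (pvSub a < pvSub b)) x _ (fun y hy => by
            have hc := pv_cat_of_mem_bucket hy; simp [pvLex, h, hc]),
          List.append_assoc]
    · rw [show List.filter (fun f => pvCat f == 0) [x] = [] by simp [h],
          show List.filter (fun f => pvCat f == 1) [x] = [x] by simp [h],
          show List.filter (fun f => pvCat f == 2) [x] = [] by simp [h],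
          List.append_nil, List.append_nil, pv_sorted_snoc, List.append_assoc,
          pv_insertBy_append_right pvLex x _ _ (fun y hy => by
            have hc := pv_cat_of_mem_bucket hy; simp [pvLex, h, hc]),
          pv_insertBy_append_left pvLex x _ _ (fun y hy => by
            have hc := pv_cat_of_mem_bucket hy; simp [pvLex, h, hc]),
          pv_insertBy_congr pvLex (fun a b => decide (pvSub a < pvSub b)) x _ (fun y hy => by
            have hc := pv_cat_of_mem_bucket hy; simp [pvLex, h, hc]),
          List.append_assoc]
    · rw [show List.filter (fun f => pvCat f == 0) [x] = [] by simp [h],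
          show List.filter (fun f => pvCat f == 1) [x] = [] by simp [h],
          show List.filter (fun f => pvCat f == 2) [x] = [x] by simp [h],
          List.append_nil, List.append_nil, pv_sorted_snoc,
          pv_insertBy_append_right pvLex x _ _ (fun y hy => by
            rcases List.mem_append.1 hy with hy1 | hy2
            · have hc := pv_cat_of_mem_bucket hy1; simp [pvLex, h, hc]
            · have hc := pv_cat_of_mem_bucket hy2; simp [pvLex, h, hc]),
          pv_insertBy_congr pvLex (fun a b => decide (pvSub a < pvSub b)) x _ (fun y hy => by
            have hc := pv_cat_of_mem_bucket hy; simp [pvLex, h, hc])]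

-- ===== VERDICT (by name: the statement is the Claim_ definition above) =====
theorem sort_by_ext_spec : Claim_equal_sort_by_ext := by
  intro files _
  unfold Spec_sort_by_ext
  show sort_by_ext files = sort_by_ext_alt files
  unfold sort_by_ext sort_by_ext_alt
  simp only [pv_fold_buckets, List.nil_append]
  rw [pv_sorted2_split]
  rw [pv_sorted_congr (List.filter (fun f => pvCat f == 0) (PySem.List.sorted files (fun x => x) false))
        (fun x => PySem.Str.slice x (some 1) none) pvSub (fun y hy => by
        have hc : pvCat y = 0 := eq_of_beq (List.mem_filter.1 hy).2
        exact (pv_sub_of_cat0 y hc).symm),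
      pv_sorted_congr (List.filter (fun f => pvCat f == 2) (PySem.List.sorted files (fun x => x) false))
        (fun x => PySem.Str.slice x (some (PySem.Str.rfind x "." + 1)) none) pvSub (fun y hy => by
        have hc : pvCat y = 2 := eq_of_beq (List.mem_filter.1 hy).2
        exact (pv_sub_of_cat2 y hc).symm),
      pv_noext_sorted]
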